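-- pv_equiv track=rewrite | github.com/vbetsch/undercover | src/core/Inspector.py | sameFirstLetter
-- ===== SOURCE A (Python) =====
-- def sameFirstLetter(words):
--     first_letters = []
--     for word in words:
--         first_letters.append(word.lower()[0])
--     if len(first_letters) != len(set(first_letters)):
--         return True
--     else:
--         return False
-- ===== SOURCE B (Python) =====
-- def sameFirstLetter(words):
--     letters = [word.lower()[0] for word in words]
--     letters.sort()
--     for x, y in zip(letters, letters[1:]):
--         if x == y:
--             return True
--     return False
-- ===== Notes on version B (the rewrite author's own statement) =====
-- stated objective: alternative
-- what changed: Replaces A's set-based duplicate test (len(list) != len(set)) with sorting the first letters and scanning once for an equal adjacent pair, with early exit on the first duplicate found.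
import Mathlib
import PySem

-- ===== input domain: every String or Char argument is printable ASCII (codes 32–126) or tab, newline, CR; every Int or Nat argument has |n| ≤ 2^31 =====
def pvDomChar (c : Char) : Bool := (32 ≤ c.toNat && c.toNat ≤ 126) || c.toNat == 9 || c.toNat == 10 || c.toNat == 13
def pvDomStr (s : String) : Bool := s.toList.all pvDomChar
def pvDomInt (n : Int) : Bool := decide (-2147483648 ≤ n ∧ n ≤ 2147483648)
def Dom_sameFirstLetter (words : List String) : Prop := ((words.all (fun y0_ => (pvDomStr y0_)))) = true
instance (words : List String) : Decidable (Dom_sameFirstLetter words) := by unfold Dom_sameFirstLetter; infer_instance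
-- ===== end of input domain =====

-- B sorts the lowercased first letters and scans once for an equal adjacent pair instead of
-- comparing the list's length with its set's length (alternative algorithm, same behaviour).


-- ===== PORT A =====
-- word.lower()[0] — total form PySem.List.pyGetD, exact under Pre_ (every word nonempty)
def sameFirstLetter (words : List String) : Bool :=
  let first_letters : List Char :=
    words.foldl (fun acc w => acc ++ [PySem.List.pyGetD (PySem.Str.lower w).toList 0 ' ']) []
  if first_letters.length ≠ (PySem.Set.ofList first_letters).length then true else false

-- ===== PORT B =====
def firstLettersB (words : List String) : List Char :=
  words.map (fun w => PySem.List.pyGetD (PySem.Str.lower w).toList 0 ' ')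

-- the 'for x, y in zip(letters, letters[1:])' adjacent scan with early exit
def adjDup : List Char → Bool
  | [] => false
  | [_] => false
  | x :: y :: rest => if x == y then true else adjDup (y :: rest)

def sameFirstLetter_alt (words : List String) : Bool :=
  adjDup (PySem.List.sorted (firstLettersB words) (fun x => x) false)

-- ===== PRECONDITION & SPEC =====
-- Pre_ excludes lists containing an empty word, on which A raises IndexError at word.lower()[0].
def Pre_sameFirstLetter (words : List String) : Prop := ∀ w ∈ words, w ≠ ""
instance (words : List String) : Decidable (Pre_sameFirstLetter words) := by
  unfold Pre_sameFirstLetter; infer_instance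
def pvWitness_sameFirstLetter : List String := ["Apple", "boat", "ant"]

def Spec_sameFirstLetter (words : List String) (out : Bool) : Prop := out = sameFirstLetter_alt words
instance (words : List String) (out : Bool) : Decidable (Spec_sameFirstLetter words out) := by
  unfold Spec_sameFirstLetter; infer_instance

-- ===== CLAIM (what is proved, stated in full; the proofs are below) =====
def Claim_equal_sameFirstLetter : Prop := ∀ (words : List String), Dom_sameFirstLetter words → Pre_sameFirstLetter words → Spec_sameFirstLetter words (sameFirstLetter words)

-- ===== LEMMAS AND PROOFS =====

-- A's test: the set of first letters is shorter than the list iff the list has a duplicate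
theorem length_ofList_eq_iff (L : List Char) :
    (PySem.Set.ofList L).length = L.length ↔ L.Nodup := by
  induction L using List.reverseRecOn with
  | nil => simp [PySem.Set.ofList]
  | append_singleton xs x ih =>
    rw [PySem.Set.ofList_append_singleton, PySem.Set.add_eq_ite]
    by_cases hx : x ∈ PySem.Set.ofList xs
    · have hx' : x ∈ xs := (PySem.Set.mem_ofList xs x).1 hx
      have hle := PySem.Set.length_ofList_le (xs := xs)
      simp only [if_pos hx, List.length_append, List.length_singleton]
      constructor
      · intro h; omega
      · intro h
        rw [List.nodup_append] at h
        exact (h.2.2 x hx' x (List.mem_singleton_self x) rfl).elim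
    · have hx' : x ∉ xs := fun h => hx ((PySem.Set.mem_ofList xs x).2 h)
      simp only [if_neg hx, List.length_append, List.length_singleton]
      constructor
      · intro h
        have : (PySem.Set.ofList xs).length = xs.length := by omega
        have hn := ih.1 this
        rw [List.nodup_append]
        exact ⟨hn, List.nodup_singleton x, fun a ha b hb he => hx' ((he.trans (List.mem_singleton.1 hb)) ▸ ha)⟩
      · intro h
        have hn : xs.Nodup := by simp [List.nodup_append] at h; exact h.1
        have := ih.2 hn
        omega

-- B's test: on a ≤-sorted list, an equal adjacent pair exists iff the list has a duplicate
theorem adjDup_iff_not_nodup (P : List Char) (hs : P.Pairwise (· ≤ ·)) :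
    adjDup P = true ↔ ¬ P.Nodup := by
  induction P with
  | nil => simp [adjDup]
  | cons x t ih =>
    cases t with
    | nil => simp [adjDup]
    | cons y rest =>
      rcases List.pairwise_cons.1 hs with ⟨hx, hs'⟩
      by_cases hxy : x = y
      · subst hxy
        simp [adjDup]
      · have hxlt : x < y := lt_of_le_of_ne (hx y (by simp)) hxy
        have hxnot : x ∉ y :: rest := by
          intro hmem
          rcases List.mem_cons.1 hmem with he | hmem
          · exact hxy he
          · rcases List.pairwise_cons.1 hs' with ⟨hy, _⟩
            exact absurd (lt_of_lt_of_le hxlt (hy x hmem)) (lt_irrefl x)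
        have : adjDup (x :: y :: rest) = adjDup (y :: rest) := by
          simp [adjDup, hxy]
        rw [this, ih hs', List.nodup_cons]
        simp [hxnot]

theorem sameFirstLetter_eq (words : List String) :
    sameFirstLetter words = sameFirstLetter_alt words := by
  unfold sameFirstLetter sameFirstLetter_alt
  rw [PySem.List.foldl_append_singleton_eq_map]
  set L := firstLettersB words with hL
  have hperm := PySem.List.sorted_perm (xs := L) (key := fun x => x) (rev := false)
  have hpw : (PySem.List.sorted L (fun x => x) false).Pairwise (· ≤ ·) :=
    PySem.List.sorted_pairwise (xs := L) (key := fun x => x)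
  have hB := adjDup_iff_not_nodup _ hpw
  rw [hperm.nodup_iff] at hB
  have hA := length_ofList_eq_iff L
  by_cases hnd : L.Nodup
  · have h1 : (PySem.Set.ofList L).length = L.length := hA.2 hnd
    have h2 : adjDup (PySem.List.sorted L (fun x => x) false) = false := by
      cases h : adjDup (PySem.List.sorted L (fun x => x) false)
      · rfl
      · exact absurd hnd (hB.1 h)
    simp [firstLettersB] at hL
    simp [← hL, h1, h2]
  · have h1 : (PySem.Set.ofList L).length ≠ L.length := fun h => hnd (hA.1 h)
    have h2 : adjDup (PySem.List.sorted L (fun x => x) false) = true := hB.2 hnd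
    simp only [firstLettersB] at hL
    simp only [← hL, List.nil_append]
    rw [if_pos (fun h : L.length = List.length (PySem.Set.ofList L) => h1 h.symm), h2]

-- ===== VERDICT (by name: the statement is the Claim_ definition above) =====
theorem sameFirstLetter_spec : Claim_equal_sameFirstLetter := by
  intro words _ _
  unfold Spec_sameFirstLetter
  exact sameFirstLetter_eq words
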